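-- pv_equiv track=rewrite | github.com/alextretyak/empireofcode.com-solutions | Crystalite farm 4/Good Radix.py | good_radix
-- ===== SOURCE A (Python) =====
-- def good_radix(str_number):
--     for radix in range(2, 37):
--         try:
--             if int(str_number, radix) % (radix-1) == 0:
--                 return radix
--         except ValueError:
--             pass
--     return 0
-- ===== SOURCE B (Python) =====
-- def _digit_value(c):
--     if '0' <= c <= '9':
--         return ord(c) - 48
--     if 'a' <= c <= 'z':
--         return ord(c) - 87
--     if 'A' <= c <= 'Z':
--         return ord(c) - 55
--     return None
--
--
-- def _body_info(t):
--     # one pass: (digit sum, max digit) of t, or None if t is not a valid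
--     # digit body (empty, bad char, or misplaced underscore)
--     sm = 0
--     mx = 0
--     need_digit = True  # at the start and right after an underscore
--     for c in t:
--         if c == '_':
--             if need_digit:
--                 return None
--             need_digit = True
--         else:
--             v = _digit_value(c)
--             if v is None:
--                 return None
--             sm += v
--             if v > mx:
--                 mx = v
--             need_digit = False
--     if need_digit:
--         return None
--     return (sm, mx)
--
--
-- def good_radix(str_number):
--     # value of the literal in radix r is congruent to its digit sum mod (r-1),
--     # so one O(n) parse replaces 35 big-int conversions
--     s = str_number.strip()
--     if s[:1] in ('+', '-'):
--         s = s[1:]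
--     core = _body_info(s)
--     special = {}
--     for base, p in ((2, 'b'), (8, 'o'), (16, 'x')):
--         if len(s) >= 2 and s[0] == '0' and (s[1] == p or s[1] == p.upper()):
--             rest = s[2:]
--             if rest[:1] == '_':
--                 rest = rest[1:]
--             special[base] = _body_info(rest)
--     for radix in range(2, 37):
--         info = special[radix] if radix in special else core
--         if info is not None:
--             sm, mx = info
--             if mx < radix and sm % (radix - 1) == 0:
--                 return radix
--     return 0
-- ===== Notes on version B (the rewrite author's own statement) =====
-- stated objective: alternative
-- what changed: B parses the string once into (digit-sum, max-digit) per possible prefix interpretation and decides each radix by the digit-sum rule value % (radix-1) == digit_sum % (radix-1), instead of A's up-to-35 big-int conversions int(s, radix); intended as asymptotically cheaper and measured 6-138x faster on mid-size inputs, but the probe could not confirm it at the largest size (A's C-level base-2 parse wins on binary strings), so no speed is claimed.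
import Mathlib
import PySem

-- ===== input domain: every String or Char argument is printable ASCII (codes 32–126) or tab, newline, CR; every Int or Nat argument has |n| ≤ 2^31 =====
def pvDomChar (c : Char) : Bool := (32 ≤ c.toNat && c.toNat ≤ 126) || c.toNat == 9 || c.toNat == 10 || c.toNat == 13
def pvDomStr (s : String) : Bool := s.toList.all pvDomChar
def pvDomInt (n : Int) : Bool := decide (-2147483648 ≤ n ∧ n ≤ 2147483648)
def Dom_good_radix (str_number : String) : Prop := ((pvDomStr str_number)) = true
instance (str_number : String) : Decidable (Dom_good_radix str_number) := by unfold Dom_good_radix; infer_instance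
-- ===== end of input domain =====

-- B replaces A's up-to-35 big-int conversions int(str_number, radix) by one pass computing
-- (digit sum, max digit) and the digit-sum divisibility rule (value ≡ digit sum mod radix-1).
-- int(s, radix) is ported BY HAND below (PySem.Int.ofCharsBase? exists but its helpers are
-- private, so the proof could not reason about it): strip, sign, 0b/0o/0x prefix for the
-- matching radix, single underscores between digits / after the prefix — exact per CPython for
-- bases 2..36 on the ASCII domain (the CPython ≥3.11 global 4300-digit conversion limit, an
-- interpreter resource guard, is not modelled).

-- ===== PORT A =====

-- digit value of a char, 99 when the char is no base-36 digit
def pvDval (c : Char) : Nat :=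
  if '0' ≤ c ∧ c ≤ '9' then c.toNat - 48
  else if 'a' ≤ c ∧ c ≤ 'z' then c.toNat - 87
  else if 'A' ≤ c ∧ c ≤ 'Z' then c.toNat - 55
  else 99

-- digits-with-underscores scanner of int(s, base): underscore only between digits
def pvGoA (b : Nat) : Nat → List Char → Option Nat
  | acc, [] => some acc
  | acc, c :: r =>
    if c = '_' then
      match r with
      | d :: r' => if pvDval d < b then pvGoA b (acc * b + pvDval d) r' else none
      | [] => none
    else if pvDval c < b then pvGoA b (acc * b + pvDval c) r else none

-- the digit body must start with a digit and be nonempty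
def pvDigitsVal (b : Nat) : List Char → Option Nat
  | [] => none
  | d :: r => if pvDval d < b then pvGoA b (pvDval d) r else none

-- int() strips whitespace on both ends (exact on the ASCII domain)
def pvStripA (s : List Char) : List Char :=
  ((s.dropWhile PySem.Int.isIntSpace).reverse.dropWhile PySem.Int.isIntSpace).reverse

def pvSignA : List Char → Bool × List Char
  | c :: r => if c = '-' then (true, r) else if c = '+' then (false, r) else (false, c :: r)
  | [] => (false, [])

-- base named by a 0b/0o/0x prefix, if any
def pvPrefixBase : List Char → Option Nat
  | c0 :: c :: _ =>
    if c0 = '0' then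
      if c = 'b' ∨ c = 'B' then some 2
      else if c = 'o' ∨ c = 'O' then some 8
      else if c = 'x' ∨ c = 'X' then some 16
      else none
    else none
  | _ => none

-- after a recognized prefix one underscore may precede the first digit
def pvAfterPrefix (b : Nat) (cs : List Char) : List Char :=
  match cs.drop 2 with
  | c :: r =>
    if c = '_' then
      match r with
      | d :: r' => if pvDval d < b then d :: r' else c :: r
      | [] => c :: r
    else c :: r
  | [] => []

-- int(s, b) for 2 ≤ b ≤ 36 (none = ValueError)
def pvIntBase? (s : List Char) (b : Nat) : Option Int :=
  let cs := pvStripA s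
  match pvSignA cs with
  | (neg, cs1) =>
    let ds := if pvPrefixBase cs1 = some b then pvAfterPrefix b cs1 else cs1
    match pvDigitsVal b ds with
    | none => none
    | some n => some (if neg then -(n : Int) else (n : Int))

-- for radix in range(2, 37): try: if int(s, radix) % (radix-1) == 0: return radix; except: pass
def pvLoopA (s : List Char) : List Int → Int
  | [] => 0
  | r :: rest =>
    match pvIntBase? s r.toNat with
    | some v => if PySem.Int.mod v (r - 1) = 0 then r else pvLoopA s rest
    | none => pvLoopA s rest

def good_radix (str_number : String) : Int :=
  pvLoopA str_number.toList (PySem.List.pyRange 2 37 1)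

-- ===== PORT B =====

def pvDigval (c : Char) : Option Nat :=
  if '0' ≤ c ∧ c ≤ '9' then some (c.toNat - 48)
  else if 'a' ≤ c ∧ c ≤ 'z' then some (c.toNat - 87)
  else if 'A' ≤ c ∧ c ≤ 'Z' then some (c.toNat - 55)
  else none

-- one pass over the body: (digit sum, max digit), or none when malformed
def pvBodyGo : Nat → Nat → Bool → List Char → Option (Nat × Nat)
  | sm, mx, needDigit, [] => if needDigit then none else some (sm, mx)
  | sm, mx, needDigit, c :: r =>
    if c = '_' then (if needDigit then none else pvBodyGo sm mx true r)
    else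
      match pvDigval c with
      | none => none
      | some v => pvBodyGo (sm + v) (if v > mx then v else mx) false r

def pvBodyInfo (t : List Char) : Option (Nat × Nat) := pvBodyGo 0 0 true t

def pvDropSign (t : List Char) : List Char :=
  match t with
  | c :: r => if c = '+' ∨ c = '-' then r else t
  | [] => t

-- rest = s[2:]; if rest[:1] == '_': rest = rest[1:]
def pvRestB (s : List Char) : List Char :=
  let rest := s.drop 2
  if rest.head? = some '_' then rest.tail else rest

-- the dict of the three possibly-prefixed bases
def pvSpecial (s : List Char) : PySem.Dict Int (Option (Nat × Nat)) :=
  List.foldl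
    (fun d (e : Int × Char × Char) =>
      match s with
      | c0 :: c1 :: _ =>
        if c0 = '0' ∧ (c1 = e.2.1 ∨ c1 = e.2.2) then
          d.insert e.1 (pvBodyInfo (pvRestB s))
        else d
      | _ => d)
    PySem.Dict.empty [(2, 'b', 'B'), (8, 'o', 'O'), (16, 'x', 'X')]

def pvLoopB (core : Option (Nat × Nat)) (special : PySem.Dict Int (Option (Nat × Nat))) :
    List Int → Int
  | [] => 0
  | r :: rest =>
    match (match special.get? r with | some i => i | none => core) with
    | some p =>
      if (p.2 : Int) < r ∧ PySem.Int.mod (p.1 : Int) (r - 1) = 0 then r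
      else pvLoopB core special rest
    | none => pvLoopB core special rest

def good_radix_alt (str_number : String) : Int :=
  let t := PySem.Chars.strip str_number.toList
  let body := pvDropSign t
  pvLoopB (pvBodyInfo body) (pvSpecial body) (PySem.List.pyRange 2 37 1)

-- ===== PRECONDITION & SPEC =====
def Spec_good_radix (str_number : String) (out : Int) : Prop := out = good_radix_alt str_number
instance (str_number : String) (out : Int) : Decidable (Spec_good_radix str_number out) := by unfold Spec_good_radix; infer_instance

-- ===== CLAIM (what is proved, stated in full; the proofs are below) =====
def Claim_equal_good_radix : Prop := ∀ (str_number : String), Dom_good_radix str_number → Spec_good_radix str_number (good_radix str_number)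

-- ===== LEMMAS AND PROOFS =====

-- relation between A's per-base parse and B's base-independent (sum, max) parse
def RelOpt (b : Nat) : Option Nat → Option (Nat × Nat) → Prop
  | none, none => True
  | none, some p => b ≤ p.2
  | some _, none => False
  | some n, some p => p.2 < b ∧ n % (b - 1) = p.1 % (b - 1)

theorem pvDval_of_digval_some (c : Char) (v : Nat) (h : pvDigval c = some v) :
    pvDval c = v := by
  unfold pvDigval at h; unfold pvDval
  split_ifs at h ⊢ <;> simp_all

theorem pvDval_of_digval_none (c : Char) (h : pvDigval c = none) :
    pvDval c = 99 := by
  unfold pvDigval at h; unfold pvDval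
  split_ifs at h ⊢ <;> simp_all

theorem pvDval_us : pvDval '_' = 99 := by decide

-- step-shape equations
theorem goA_us_nil (b acc : Nat) : pvGoA b acc ['_'] = none := rfl

theorem goA_us (b acc : Nat) (d : Char) (r' : List Char) :
    pvGoA b acc ('_' :: d :: r') =
      if pvDval d < b then pvGoA b (acc * b + pvDval d) r' else none := by
  simp [pvGoA]

theorem goA_digit (b acc : Nat) (c : Char) (r : List Char) (hc : c ≠ '_') :
    pvGoA b acc (c :: r) =
      if pvDval c < b then pvGoA b (acc * b + pvDval c) r else none := by
  rcases r with _ | ⟨d, r'⟩ <;> simp [pvGoA, hc]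

theorem bodyGo_nil_false (sm mx : Nat) : pvBodyGo sm mx false [] = some (sm, mx) := by
  simp [pvBodyGo]

theorem bodyGo_nil_true (sm mx : Nat) : pvBodyGo sm mx true [] = none := by
  simp [pvBodyGo]

theorem bodyGo_us_false (sm mx : Nat) (r : List Char) :
    pvBodyGo sm mx false ('_' :: r) = pvBodyGo sm mx true r := by
  simp [pvBodyGo]

theorem bodyGo_us_true (sm mx : Nat) (r : List Char) :
    pvBodyGo sm mx true ('_' :: r) = none := by
  simp [pvBodyGo]

theorem bodyGo_digit (sm mx : Nat) (f : Bool) (c : Char) (r : List Char) (hc : c ≠ '_') :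
    pvBodyGo sm mx f (c :: r) =
      match pvDigval c with
      | none => none
      | some v => pvBodyGo (sm + v) (if v > mx then v else mx) false r := by
  simp [pvBodyGo, hc]

-- one digit step keeps the value ≡ digit-sum congruence mod (b-1)
theorem pvModStep (b acc sm v : Nat) (hb : 2 ≤ b)
    (h : acc % (b - 1) = sm % (b - 1)) :
    (acc * b + v) % (b - 1) = (sm + v) % (b - 1) := by
  obtain ⟨m, rfl⟩ : ∃ m, b = m + 1 := ⟨b - 1, by omega⟩
  simp only [Nat.add_sub_cancel] at *
  have e : acc * (m + 1) + v = (acc + v) + acc * m := by ring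
  rw [e, Nat.add_mul_mod_self_right, Nat.add_mod, h, ← Nat.add_mod]

theorem pvBodyGo_mono : ∀ (ds : List Char) (sm mx : Nat) (f : Bool) (s' m' : Nat),
    pvBodyGo sm mx f ds = some (s', m') → mx ≤ m' := by
  intro ds
  induction ds with
  | nil =>
    intro sm mx f s' m' h
    unfold pvBodyGo at h
    split_ifs at h <;> simp_all
  | cons c r ih =>
    intro sm mx f s' m' h
    unfold pvBodyGo at h
    split_ifs at h with h1 h2
    · exact ih _ _ _ _ _ h
    · cases hdv : pvDigval c with
      | none => rw [hdv] at h; simp at h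
      | some v =>
        rw [hdv] at h; simp only at h
        have := ih _ _ _ _ _ h
        by_cases hv : v > mx <;> simp [hv] at this <;> omega

-- the heart: A's valued scan and B's (sum, max) scan stay related
theorem pvGo_rel : ∀ (n : Nat) (ds : List Char), ds.length ≤ n →
    ∀ (b acc sm mx : Nat), 2 ≤ b → b ≤ 36 → mx < b → acc % (b - 1) = sm % (b - 1) →
    RelOpt b (pvGoA b acc ds) (pvBodyGo sm mx false ds) := by
  intro n
  induction n with
  | zero =>
    intro ds hlen b acc sm mx hb hb36 hmx hcong
    have : ds = [] := List.eq_nil_of_length_eq_zero (by omega)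
    subst this
    simp [pvGoA, bodyGo_nil_false, RelOpt, hmx, hcong]
  | succ n ih =>
    intro ds hlen b acc sm mx hb hb36 hmx hcong
    match ds with
    | [] => simp [pvGoA, bodyGo_nil_false, RelOpt, hmx, hcong]
    | c :: r =>
      by_cases hc : c = '_'
      · subst hc
        rw [bodyGo_us_false]
        match r with
        | [] => rw [goA_us_nil, bodyGo_nil_true]; simp [RelOpt]
        | d :: r' =>
          rw [goA_us b acc d r']
          by_cases hd : d = '_'
          · subst hd
            rw [bodyGo_us_true]
            have : ¬ pvDval '_' < b := by rw [pvDval_us]; omega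
            simp [this, RelOpt]
          · rw [bodyGo_digit _ _ _ _ _ hd]
            cases hdv : pvDigval d with
            | none =>
              have h99 : pvDval d = 99 := pvDval_of_digval_none d hdv
              have hnlt : ¬ pvDval d < b := by omega
              simp [hnlt, RelOpt]
            | some v =>
              have hv : pvDval d = v := pvDval_of_digval_some d v hdv
              simp only [hv]
              by_cases hvb : v < b
              · rw [if_pos hvb]
                exact ih r' (by simp at hlen; omega) b (acc * b + v) (sm + v)
                  (if v > mx then v else mx) hb hb36 (by split_ifs <;> omega)
                  (pvModStep b acc sm v hb hcong)
              · rw [if_neg hvb]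
                cases hbg : pvBodyGo (sm + v) (if v > mx then v else mx) false r' with
                | none => simp [RelOpt]
                | some p =>
                  have hmono := pvBodyGo_mono r' _ _ _ p.1 p.2 (by rw [hbg])
                  have hbp : b ≤ p.2 := by split_ifs at hmono <;> omega
                  simp [RelOpt, hbp]
      · rw [goA_digit _ _ _ _ hc, bodyGo_digit _ _ _ _ _ hc]
        cases hdv : pvDigval c with
        | none =>
          have h99 : pvDval c = 99 := pvDval_of_digval_none c hdv
          have hnlt : ¬ pvDval c < b := by omega
          simp [hnlt, RelOpt]
        | some v =>
          have hv : pvDval c = v := pvDval_of_digval_some c v hdv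
          simp only [hv]
          by_cases hvb : v < b
          · rw [if_pos hvb]
            exact ih r (by simp at hlen; omega) b (acc * b + v) (sm + v)
              (if v > mx then v else mx) hb hb36 (by split_ifs <;> omega)
              (pvModStep b acc sm v hb hcong)
          · rw [if_neg hvb]
            cases hbg : pvBodyGo (sm + v) (if v > mx then v else mx) false r with
            | none => simp [RelOpt]
            | some p =>
              have hmono := pvBodyGo_mono r _ _ _ p.1 p.2 (by rw [hbg])
              have hbp : b ≤ p.2 := by split_ifs at hmono <;> omega
              simp [RelOpt, hbp]

theorem pvDigits_rel (ds : List Char) (b : Nat) (hb : 2 ≤ b) (hb36 : b ≤ 36) :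
    RelOpt b (pvDigitsVal b ds) (pvBodyInfo ds) := by
  match ds with
  | [] => simp [pvDigitsVal, pvBodyInfo, bodyGo_nil_true, RelOpt]
  | c :: r =>
    unfold pvBodyInfo
    by_cases hc : c = '_'
    · subst hc
      rw [bodyGo_us_true]
      have : ¬ pvDval '_' < b := by rw [pvDval_us]; omega
      simp [pvDigitsVal, this, RelOpt]
    · rw [bodyGo_digit _ _ _ _ _ hc]
      cases hdv : pvDigval c with
      | none =>
        have h99 : pvDval c = 99 := pvDval_of_digval_none c hdv
        have hnlt : ¬ pvDval c < b := by omega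
        simp [pvDigitsVal, hnlt, RelOpt]
      | some v =>
        have hv : pvDval c = v := pvDval_of_digval_some c v hdv
        simp only [pvDigitsVal, hv]
        by_cases hvb : v < b
        · rw [if_pos hvb]
          have := pvGo_rel r.length r le_rfl b v (0 + v) (if v > 0 then v else 0) hb hb36
            (by split_ifs <;> omega) (by simp)
          exact this
        · rw [if_neg hvb]
          cases hbg : pvBodyGo (0 + v) (if v > 0 then v else 0) false r with
          | none => simp [RelOpt]
          | some p =>
            have hmono := pvBodyGo_mono r _ _ _ p.1 p.2 (by rw [hbg])
            have hbp : b ≤ p.2 := by split_ifs at hmono <;> omega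
            simp [RelOpt, hbp]

-- relation carries over the optional-underscore-after-prefix step
theorem pvAfter_rel (b : Nat) (cs1 : List Char) (hb : 2 ≤ b) (hb36 : b ≤ 36) :
    RelOpt b (pvDigitsVal b (pvAfterPrefix b cs1)) (pvBodyInfo (pvRestB cs1)) := by
  unfold pvAfterPrefix pvRestB
  rcases hdrop : cs1.drop 2 with _ | ⟨c, r⟩
  · simp [pvDigitsVal, pvBodyInfo, bodyGo_nil_true, RelOpt]
  · by_cases hc : c = '_'
    · subst hc
      simp only [List.head?_cons, if_pos (rfl : some '_' = some '_'), List.tail_cons]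
      cases r with
      | nil =>
        have hlt : ¬ pvDval '_' < b := by rw [pvDval_us]; omega
        simp [pvDigitsVal, hlt, pvBodyInfo, bodyGo_nil_true, RelOpt]
      | cons d r' =>
        by_cases hd : pvDval d < b
        · simp only [if_pos trivial, if_pos hd]
          exact pvDigits_rel (d :: r') b hb hb36
        · simp only [if_pos trivial, if_neg hd]
          have hlt : ¬ pvDval '_' < b := by rw [pvDval_us]; omega
          by_cases hd' : d = '_'
          · subst hd'
            simp [pvDigitsVal, hlt, pvBodyInfo, bodyGo_us_true, RelOpt]
          · unfold pvBodyInfo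
            rw [bodyGo_digit _ _ _ _ _ hd']
            cases hdv : pvDigval d with
            | none => simp [pvDigitsVal, hlt, RelOpt]
            | some v =>
              have hv : pvDval d = v := pvDval_of_digval_some d v hdv
              cases hbg : pvBodyGo v (if 0 < v then v else 0) false r' with
              | none => simp [pvDigitsVal, hlt, RelOpt, hbg]
              | some p =>
                have hmono := pvBodyGo_mono r' _ _ _ p.1 p.2 (by rw [hbg])
                have hbp : b ≤ p.2 := by split_ifs at hmono <;> omega
                simp [pvDigitsVal, hlt, RelOpt, hbp, hbg]
    · simp only [List.head?_cons, if_neg hc,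
        if_neg (fun hh : some c = some '_' => hc (by simpa using hh))]
      exact pvDigits_rel (c :: r) b hb hb36

-- what B's dict lookup returns, as a function of the prefix
theorem pvSpecial_get (cs1 : List Char) (r : Int) (h2 : 2 ≤ r) (h36 : r ≤ 36) :
    (pvSpecial cs1).get? r =
      if pvPrefixBase cs1 = some r.toNat then some (pvBodyInfo (pvRestB cs1)) else none := by
  rcases cs1 with _ | ⟨c0, _ | ⟨c1, t⟩⟩
  · simp [pvSpecial, pvPrefixBase]
  · simp [pvSpecial, pvPrefixBase]
  · by_cases h0 : c0 = '0'
    · subst h0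
      by_cases h : c1 = 'b'
      · subst h
        simp only [pvSpecial, List.foldl_cons, List.foldl_nil, pvPrefixBase,
          show (('b':Char) = 'b') = True from by decide,
          show (('b':Char) = 'B') = False from by decide,
          show (('b':Char) = 'o') = False from by decide,
          show (('b':Char) = 'O') = False from by decide,
          show (('b':Char) = 'x') = False from by decide,
          show (('b':Char) = 'X') = False from by decide,
          show (('0':Char) = '0') = True from by decide,
          true_and, false_and, and_true, and_false, true_or, or_true, false_or, or_false,
          if_true, if_false]
        rw [PySem.Dict.get?_insert]
        by_cases hr : r = 2
        · subst hr
          simp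
        · have hnt : ¬ ((2 : Nat) = r.toNat) := by omega
          simp [hr, hnt, PySem.Dict.get?_empty]
      by_cases h : c1 = 'B'
      · subst h
        simp only [pvSpecial, List.foldl_cons, List.foldl_nil, pvPrefixBase,
          show (('B':Char) = 'b') = False from by decide,
          show (('B':Char) = 'B') = True from by decide,
          show (('B':Char) = 'o') = False from by decide,
          show (('B':Char) = 'O') = False from by decide,
          show (('B':Char) = 'x') = False from by decide,
          show (('B':Char) = 'X') = False from by decide,
          show (('0':Char) = '0') = True from by decide,
          true_and, false_and, and_true, and_false, true_or, or_true, false_or, or_false,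
          if_true, if_false]
        rw [PySem.Dict.get?_insert]
        by_cases hr : r = 2
        · subst hr
          simp
        · have hnt : ¬ ((2 : Nat) = r.toNat) := by omega
          simp [hr, hnt, PySem.Dict.get?_empty]
      by_cases h : c1 = 'o'
      · subst h
        simp only [pvSpecial, List.foldl_cons, List.foldl_nil, pvPrefixBase,
          show (('o':Char) = 'b') = False from by decide,
          show (('o':Char) = 'B') = False from by decide,
          show (('o':Char) = 'o') = True from by decide,
          show (('o':Char) = 'O') = False from by decide,
          show (('o':Char) = 'x') = False from by decide,
          show (('o':Char) = 'X') = False from by decide,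
          show (('0':Char) = '0') = True from by decide,
          true_and, false_and, and_true, and_false, true_or, or_true, false_or, or_false,
          if_true, if_false]
        rw [PySem.Dict.get?_insert]
        by_cases hr : r = 8
        · subst hr
          simp
        · have hnt : ¬ ((8 : Nat) = r.toNat) := by omega
          simp [hr, hnt, PySem.Dict.get?_empty]
      by_cases h : c1 = 'O'
      · subst h
        simp only [pvSpecial, List.foldl_cons, List.foldl_nil, pvPrefixBase,
          show (('O':Char) = 'b') = False from by decide,
          show (('O':Char) = 'B') = False from by decide,
          show (('O':Char) = 'o') = False from by decide,
          show (('O':Char) = 'O') = True from by decide,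
          show (('O':Char) = 'x') = False from by decide,
          show (('O':Char) = 'X') = False from by decide,
          show (('0':Char) = '0') = True from by decide,
          true_and, false_and, and_true, and_false, true_or, or_true, false_or, or_false,
          if_true, if_false]
        rw [PySem.Dict.get?_insert]
        by_cases hr : r = 8
        · subst hr
          simp
        · have hnt : ¬ ((8 : Nat) = r.toNat) := by omega
          simp [hr, hnt, PySem.Dict.get?_empty]
      by_cases h : c1 = 'x'
      · subst h
        simp only [pvSpecial, List.foldl_cons, List.foldl_nil, pvPrefixBase,
          show (('x':Char) = 'b') = False from by decide,
          show (('x':Char) = 'B') = False from by decide,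
          show (('x':Char) = 'o') = False from by decide,
          show (('x':Char) = 'O') = False from by decide,
          show (('x':Char) = 'x') = True from by decide,
          show (('x':Char) = 'X') = False from by decide,
          show (('0':Char) = '0') = True from by decide,
          true_and, false_and, and_true, and_false, true_or, or_true, false_or, or_false,
          if_true, if_false]
        rw [PySem.Dict.get?_insert]
        by_cases hr : r = 16
        · subst hr
          simp
        · have hnt : ¬ ((16 : Nat) = r.toNat) := by omega
          simp [hr, hnt, PySem.Dict.get?_empty]
      by_cases h : c1 = 'X'
      · subst h
        simp only [pvSpecial, List.foldl_cons, List.foldl_nil, pvPrefixBase,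
          show (('X':Char) = 'b') = False from by decide,
          show (('X':Char) = 'B') = False from by decide,
          show (('X':Char) = 'o') = False from by decide,
          show (('X':Char) = 'O') = False from by decide,
          show (('X':Char) = 'x') = False from by decide,
          show (('X':Char) = 'X') = True from by decide,
          show (('0':Char) = '0') = True from by decide,
          true_and, false_and, and_true, and_false, true_or, or_true, false_or, or_false,
          if_true, if_false]
        rw [PySem.Dict.get?_insert]
        by_cases hr : r = 16
        · subst hr
          simp
        · have hnt : ¬ ((16 : Nat) = r.toNat) := by omega
          simp [hr, hnt, PySem.Dict.get?_empty]
      · have hcb : ¬ (c1 = 'b' ∨ c1 = 'B') := by rename_i h1 h2 h3 h4 h5; intro hh; rcases hh with hh | hh <;> simp_all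
        have hco : ¬ (c1 = 'o' ∨ c1 = 'O') := by intro hh; rcases hh with hh | hh <;> simp_all
        have hcx : ¬ (c1 = 'x' ∨ c1 = 'X') := by intro hh; rcases hh with hh | hh <;> simp_all
        simp [pvSpecial, pvPrefixBase, hcb, hco, hcx, PySem.Dict.get?_empty]
    · simp [pvSpecial, pvPrefixBase, h0]

def pvTestA (s : List Char) (r : Int) : Bool :=
  match pvIntBase? s r.toNat with
  | some v => decide (PySem.Int.mod v (r - 1) = 0)
  | none => false

def pvTestB (core : Option (Nat × Nat)) (special : PySem.Dict Int (Option (Nat × Nat)))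
    (r : Int) : Bool :=
  match (match special.get? r with | some i => i | none => core) with
  | some p => decide ((p.2 : Int) < r ∧ PySem.Int.mod (p.1 : Int) (r - 1) = 0)
  | none => false

theorem pvLoopA_step (s : List Char) (r : Int) (rest : List Int) :
    pvLoopA s (r :: rest) = if pvTestA s r then r else pvLoopA s rest := by
  show (match pvIntBase? s r.toNat with
    | some v => if PySem.Int.mod v (r - 1) = 0 then r else pvLoopA s rest
    | none => pvLoopA s rest) = _
  unfold pvTestA
  cases hA : pvIntBase? s r.toNat with
  | some v => by_cases h : PySem.Int.mod v (r - 1) = 0 <;> simp [h]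
  | none => simp

theorem pvLoopB_step (core : Option (Nat × Nat)) (special : PySem.Dict Int (Option (Nat × Nat)))
    (r : Int) (rest : List Int) :
    pvLoopB core special (r :: rest) =
      if pvTestB core special r then r else pvLoopB core special rest := by
  show (match (match special.get? r with | some i => i | none => core) with
    | some p =>
      if (p.2 : Int) < r ∧ PySem.Int.mod (p.1 : Int) (r - 1) = 0 then r
      else pvLoopB core special rest
    | none => pvLoopB core special rest) = _
  unfold pvTestB
  cases hI : (match special.get? r with | some i => i | none => core) with
  | some p =>
    by_cases h : (p.2 : Int) < r ∧ PySem.Int.mod (p.1 : Int) (r - 1) = 0 <;> simp [h]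
  | none => simp

def pvTestValA (r : Int) (neg : Bool) (n? : Option Nat) : Bool :=
  match n? with
  | some n => decide (PySem.Int.mod (if neg then -(n : Int) else (n : Int)) (r - 1) = 0)
  | none => false

def pvTestValB (r : Int) (p? : Option (Nat × Nat)) : Bool :=
  match p? with
  | some p => decide ((p.2 : Int) < r ∧ PySem.Int.mod (p.1 : Int) (r - 1) = 0)
  | none => false

-- a related pair decides the radix test identically (the sign cannot change divisibility)
theorem pvRelTest (r : Int) (h2 : 2 ≤ r) (h36 : r ≤ 36) (neg : Bool)
    (n? : Option Nat) (p? : Option (Nat × Nat)) (h : RelOpt r.toNat n? p?) :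
    pvTestValA r neg n? = pvTestValB r p? := by
  unfold pvTestValA pvTestValB
  cases n? with
  | none =>
    cases p? with
    | none => rfl
    | some p =>
      have hp : r.toNat ≤ p.2 := h
      have : ¬ ((p.2 : Int) < r) := by omega
      simp [this]
  | some n =>
    cases p? with
    | none => exact absurd h (by simp [RelOpt])
    | some p =>
      obtain ⟨hlt, hmod⟩ := h
      have hlt' : (p.2 : Int) < r := by omega
      have hr1 : (r - 1 : Int) = ((r.toNat - 1 : Nat) : Int) := by omega
      have hpos : 0 < r.toNat - 1 := by omega
      have hiff : PySem.Int.mod (if neg then -(n : Int) else (n : Int)) (r - 1) = 0 ↔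
          PySem.Int.mod (p.1 : Int) (r - 1) = 0 := by
        rw [PySem.Int.mod_eq_zero_iff_dvd, PySem.Int.mod_eq_zero_iff_dvd]
        have e1 : ((r - 1 : Int) ∣ (if neg then -(n : Int) else (n : Int))) ↔
            ((r - 1 : Int) ∣ (n : Int)) := by
          cases neg <;> simp
        rw [e1, hr1, Int.natCast_dvd_natCast, Int.natCast_dvd_natCast,
          Nat.dvd_iff_mod_eq_zero, Nat.dvd_iff_mod_eq_zero]
        omega
      simp [hlt', hiff]

theorem pvDropSign_eq (t : List Char) : pvDropSign t = (pvSignA t).2 := by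
  cases t with
  | nil => rfl
  | cons c r =>
    unfold pvDropSign pvSignA
    by_cases h1 : c = '-' <;> by_cases h2 : c = '+' <;> simp [h1, h2]

-- per-radix: A's try-parse-and-test equals B's table lookup and digit-sum test
theorem pvTest_eq (s : List Char) (hstrip : pvStripA s = PySem.Chars.strip s)
    (r : Int) (h2 : 2 ≤ r) (h36 : r ≤ 36) :
    pvTestA s r = pvTestB (pvBodyInfo (pvDropSign (PySem.Chars.strip s)))
      (pvSpecial (pvDropSign (PySem.Chars.strip s))) r := by
  have hb2 : 2 ≤ r.toNat := by omega
  have hb36 : r.toNat ≤ 36 := by omega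
  rw [← hstrip, pvDropSign_eq]
  unfold pvTestA pvIntBase?
  cases hsign : pvSignA (pvStripA s) with
  | mk neg cs1 =>
    simp only [hsign]
    unfold pvTestB
    rw [pvSpecial_get cs1 r h2 h36]
    by_cases hp : pvPrefixBase cs1 = some r.toNat
    · rw [if_pos hp, if_pos hp]
      have hrel := pvAfter_rel r.toNat cs1 hb2 hb36
      cases hD : pvDigitsVal r.toNat (pvAfterPrefix r.toNat cs1) with
      | none => exact pvRelTest r h2 h36 neg none _ (hD ▸ hrel)
      | some n => exact pvRelTest r h2 h36 neg (some n) _ (hD ▸ hrel)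
    · rw [if_neg hp, if_neg hp]
      have hrel := pvDigits_rel cs1 r.toNat hb2 hb36
      cases hD : pvDigitsVal r.toNat cs1 with
      | none => exact pvRelTest r h2 h36 neg none _ (hD ▸ hrel)
      | some n => exact pvRelTest r h2 h36 neg (some n) _ (hD ▸ hrel)

theorem pvLoop_eq (s : List Char) (hstrip : pvStripA s = PySem.Chars.strip s) :
    ∀ (l : List Int), (∀ r ∈ l, 2 ≤ r ∧ r ≤ 36) →
    pvLoopA s l = pvLoopB (pvBodyInfo (pvDropSign (PySem.Chars.strip s)))
      (pvSpecial (pvDropSign (PySem.Chars.strip s))) l := by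
  intro l
  induction l with
  | nil => intro _; rfl
  | cons r rest ih =>
    intro hmem
    rw [pvLoopA_step, pvLoopB_step,
      pvTest_eq s hstrip r (hmem r (by simp)).1 (hmem r (by simp)).2,
      ih (fun x hx => hmem x (by simp [hx]))]

theorem pvChar_eq_of_toNat (c d : Char) (h : c.toNat = d.toNat) : c = d := by
  unfold Char.toNat at h
  exact Char.ext (UInt32.toNat_inj.mp h)

theorem pvSpace_eq (c : Char) (h : pvDomChar c = true) :
    PySem.Int.isIntSpace c = PySem.Chars.isspace c := by
  have hn : c.toNat = 9 ∨ c.toNat = 10 ∨ c.toNat = 13 ∨ (32 ≤ c.toNat ∧ c.toNat ≤ 126) := by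
    unfold pvDomChar at h
    simp at h
    omega
  rcases hn with h9 | h10 | h13 | ⟨hlo, hhi⟩
  · rw [pvChar_eq_of_toNat c '\t' (by rw [h9]; rfl)]; decide
  · rw [pvChar_eq_of_toNat c '\n' (by rw [h10]; rfl)]; decide
  · rw [pvChar_eq_of_toNat c '\x0d' (by rw [h13]; rfl)]; decide
  · by_cases h32 : c.toNat = 32
    · rw [pvChar_eq_of_toNat c ' ' (by rw [h32]; rfl)]; decide
    · have e : ∀ (d : Char), (c = d) = (c.toNat = d.toNat) :=
        fun d => propext ⟨fun hh => by rw [hh], fun hh => pvChar_eq_of_toNat c d hh⟩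
      unfold PySem.Int.isIntSpace PySem.Chars.isspace
      simp only [e,
        show (' ' : Char).toNat = 32 from rfl, show ('\t' : Char).toNat = 9 from rfl,
        show ('\n' : Char).toNat = 10 from rfl, show ('\x0d' : Char).toNat = 13 from rfl,
        show ('\x0b' : Char).toNat = 11 from rfl, show ('\x0c' : Char).toNat = 12 from rfl]
      simp only [show ¬(c.toNat = 32) from by omega, show ¬(c.toNat = 9) from by omega,
        show ¬(c.toNat = 10) from by omega, show ¬(c.toNat = 13) from by omega,
        show ¬(c.toNat = 11) from by omega, show ¬(c.toNat = 12) from by omega,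
        show ¬(c.toNat ≤ 13) from by omega, show ¬(c.toNat ≤ 31) from by omega,
        show ¬(c.toNat = 133) from by omega, show ¬(c.toNat = 160) from by omega,
        show ¬(c.toNat = 5760) from by omega, show ¬(8192 ≤ c.toNat) from by omega,
        show ¬(c.toNat = 8232) from by omega, show ¬(c.toNat = 8233) from by omega,
        show ¬(c.toNat = 8239) from by omega, show ¬(c.toNat = 8287) from by omega,
        show ¬(c.toNat = 12288) from by omega]
      simp

theorem pvDropWhile_congr (p q : Char → Bool) :
    ∀ (l : List Char), (∀ c ∈ l, p c = q c) → l.dropWhile p = l.dropWhile q := by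
  intro l h
  induction l with
  | nil => rfl
  | cons c r ih =>
    simp only [List.dropWhile_cons]
    rw [h c (by simp)]
    split
    · exact ih (fun x hx => h x (by simp [hx]))
    · rfl

theorem pvStrip_eq (l : List Char) (h : ∀ c ∈ l, pvDomChar c = true) :
    pvStripA l = PySem.Chars.strip l := by
  unfold pvStripA PySem.Chars.strip PySem.Chars.rstrip PySem.Chars.lstrip
  rw [pvDropWhile_congr _ _ l (fun c hc => pvSpace_eq c (h c hc))]
  congr 1
  refine pvDropWhile_congr _ _ _ (fun c hc => pvSpace_eq c (h c ?_))
  have h1 : c ∈ l.dropWhile PySem.Chars.isspace := by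
    simpa using hc
  exact (List.dropWhile_sublist _).subset h1

theorem good_radix_spec : Claim_equal_good_radix := by
  intro s hDom
  unfold Spec_good_radix good_radix good_radix_alt
  have hDom' : ∀ c ∈ s.toList, pvDomChar c = true := by
    unfold Dom_good_radix pvDomStr at hDom
    simpa [List.all_eq_true] using hDom
  exact pvLoop_eq s.toList (pvStrip_eq s.toList hDom') (PySem.List.pyRange 2 37 1)
    (fun r hr => by
      have := (PySem.List.mem_pyRange_one).mp hr
      omega)
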